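-- pv_equiv track=rewrite | github.com/delaanthonio/hackerrank | algorithms/dp/kmarsh/kmarsh.py | kmarsh
-- ===== SOURCE A (Python) =====
-- from typing import List
--
-- MIN_LEN = 1
--
-- def prefixes(row: str) -> List[int]:
--     new_row = [-1]
--     for i, x in enumerate(row):
--         if x == '.':
--             new_row.append(new_row[i] + 1)
--         else:
--             new_row.append(-1)
--     return tuple(new_row[1:])
--
-- def kmarsh(marsh: List[str]) -> int:
--     prfx_rows = [prefixes(row) for row in marsh]
--     prfx_cols = [prefixes(col) for col in zip(*marsh)]
--     prfx_cols = [col for col in zip(*prfx_cols)]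
--     max_area = 0
--     for bt in range(MIN_LEN, len(marsh)):
--         for rt in range(MIN_LEN, len(marsh[0])):
--             ptl_h = prfx_cols[bt][rt]
--             ptl_w = prfx_rows[bt][rt]
--             ptl_area = 2 * (ptl_h + ptl_w)
--             if ptl_h < MIN_LEN or ptl_w < MIN_LEN or ptl_area < max_area:
--                 continue
--             for lf in range(rt - ptl_w, rt):
--                 if prfx_cols[bt][lf] < MIN_LEN:
--                     continue
--                 w = rt - lf
--                 for tp in range(bt - ptl_h, bt):
--                     if prfx_rows[tp][rt] < MIN_LEN:
--                         continue
--                     h = bt - tp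
--                     if prfx_rows[tp][rt] >= w and prfx_cols[bt][lf] >= h:
--                         area = 2 * (h + w)
--                         if area > max_area:
--                             max_area = area
--                         break
--     return max_area
-- ===== SOURCE B (Python) =====
-- def kmarsh(marsh):
--     R = len(marsh)
--     if R < 2:
--         return 0
--     C = len(marsh[0])
--     if C < 2:
--         return 0
--     best = 0
--     vert = [0] * C
--     for bt in range(R):
--         rowb = marsh[bt]
--         vert = [vert[c] + 1 if rowb[c] == '.' else 0 for c in range(C)]
--         mv = max(vert)
--         # a border needs vert >= bt - tp + 1 at both side columns, so tp >= bt - mv + 1;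
--         # heights shrink as tp grows, so once even a full-width rectangle cannot beat
--         # best, no later tp can either
--         for tp in range(max(0, bt - mv + 1), bt):
--             if 2 * ((bt - tp) + (C - 1)) <= best:
--                 break
--             need = bt - tp + 1
--             rowt = marsh[tp]
--             lf = -1
--             for c in range(C):
--                 if rowt[c] != '.' or rowb[c] != '.':
--                     lf = -1
--                 elif vert[c] >= need:
--                     if lf >= 0:
--                         p = 2 * ((bt - tp) + (c - lf))
--                         if p > best:
--                             best = p
--                     else:
--                         lf = c
--     return best
-- ===== Notes on version B (the rewrite author's own statement) =====
-- stated objective: alternative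
-- what changed: A fixes a bottom-right corner and greedily re-scans candidate left columns and top rows for every corner; B sweeps each pair of rows once left-to-right, maintaining per column the length of the clear vertical run and, inside the current horizontal clear run, the leftmost column whose run is tall enough (with exact height/perimeter bounds to skip hopeless row pairs).
import Mathlib
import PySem

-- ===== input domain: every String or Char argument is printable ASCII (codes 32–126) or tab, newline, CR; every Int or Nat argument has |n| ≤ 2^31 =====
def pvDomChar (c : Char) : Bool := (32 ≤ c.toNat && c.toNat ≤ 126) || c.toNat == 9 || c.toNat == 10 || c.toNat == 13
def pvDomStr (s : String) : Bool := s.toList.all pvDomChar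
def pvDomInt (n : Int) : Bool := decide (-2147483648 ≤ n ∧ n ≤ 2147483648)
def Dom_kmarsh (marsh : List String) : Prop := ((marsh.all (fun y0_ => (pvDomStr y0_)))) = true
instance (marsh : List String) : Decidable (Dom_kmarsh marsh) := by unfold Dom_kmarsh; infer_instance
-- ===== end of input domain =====

-- B replaces A's per-(bottom,right)-corner greedy scans with a row-pair sweep that keeps,
-- per horizontal run, the leftmost column whose vertical clear run is tall enough
-- (objective: alternative — a genuinely different algorithm of comparable measured cost).

-- ===== PORT A =====
-- Python list indexing xs[i]; every access is in range under Pre_kmarsh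
def pvIdx (l : List Int) (i : Int) : Int := PySem.List.pyGetD l i 0
def pvRow (l : List (List Int)) (i : Int) : List Int := PySem.List.pyGetD l i []

-- prefixes(row): inside Python's loop new_row[i] is the previously appended value,
-- so the literal port threads that previous value
def prefixesGo (prev : Int) : List Char → List Int
  | [] => []
  | x :: xs =>
      let v := if x = '.' then prev + 1 else -1
      v :: prefixesGo v xs

def prefixes (row : List Char) : List Int := prefixesGo (-1) row

-- zip(*xss): transpose truncated to the shortest list (exact for Python's zip)
def pyZipT {α : Type} [Inhabited α] (xss : List (List α)) : List (List α) :=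
  if h : xss = [] ∨ xss.any (·.isEmpty) then []
  else (xss.map (fun l => l.headD default)) :: pyZipT (xss.map (·.tail))
termination_by (xss.headD []).length
decreasing_by
  simp only [not_or] at h
  rcases xss with _ | ⟨a, t⟩
  · exact absurd rfl h.1
  · have ha : a ≠ [] := by
      intro he
      exact h.2 (by simp [he])
    rcases a with _ | ⟨x, xs⟩
    · exact absurd rfl ha
    · simp

-- the 'for tp in range(bt - ptl_h, bt)' loop (returns the possibly-updated max_area; break = return)
def kTpLoop (pr pc : List (List Int)) (bt rt lf : Int) : List Int → Int → Int
  | [], acc => acc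
  | tp :: rest, acc =>
      if pvIdx (pvRow pr tp) rt < 1 then kTpLoop pr pc bt rt lf rest acc
      else
        if pvIdx (pvRow pr tp) rt ≥ rt - lf ∧ pvIdx (pvRow pc bt) lf ≥ bt - tp then
          if 2 * ((bt - tp) + (rt - lf)) > acc then 2 * ((bt - tp) + (rt - lf)) else acc
        else kTpLoop pr pc bt rt lf rest acc

-- the 'for lf in range(rt - ptl_w, rt)' loop
def kLfLoop (pr pc : List (List Int)) (bt rt ptl_h : Int) : List Int → Int → Int
  | [], acc => acc
  | lf :: rest, acc =>
      if pvIdx (pvRow pc bt) lf < 1 then kLfLoop pr pc bt rt ptl_h rest acc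
      else kLfLoop pr pc bt rt ptl_h rest
        (kTpLoop pr pc bt rt lf (PySem.List.pyRange (bt - ptl_h) bt 1) acc)

-- the 'for rt in range(MIN_LEN, len(marsh[0]))' loop
def kRtLoop (pr pc : List (List Int)) (bt : Int) : List Int → Int → Int
  | [], acc => acc
  | rt :: rest, acc =>
      let ptl_h := pvIdx (pvRow pc bt) rt
      let ptl_w := pvIdx (pvRow pr bt) rt
      if ptl_h < 1 ∨ ptl_w < 1 ∨ 2 * (ptl_h + ptl_w) < acc then kRtLoop pr pc bt rest acc
      else kRtLoop pr pc bt rest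
        (kLfLoop pr pc bt rt ptl_h (PySem.List.pyRange (rt - ptl_w) rt 1) acc)

-- the 'for bt in range(MIN_LEN, len(marsh))' loop
def kBtLoop (pr pc : List (List Int)) (rts : List Int) : List Int → Int → Int
  | [], acc => acc
  | bt :: rest, acc => kBtLoop pr pc rts rest (kRtLoop pr pc bt rts acc)

def kmarsh (marsh : List String) : Int :=
  let prfx_rows := marsh.map (fun r => prefixes r.toList)
  let prfx_cols := pyZipT ((pyZipT (marsh.map String.toList)).map prefixes)
  kBtLoop prfx_rows prfx_cols
    (PySem.List.pyRange 1 (((marsh.headD "").length : Int)) 1)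
    (PySem.List.pyRange 1 ((marsh.length : Int)) 1) 0

-- ===== PORT B =====
def pvChr (l : List Char) (i : Int) : Char := PySem.List.pyGetD l i ' '
def pvRowC (g : List (List Char)) (i : Int) : List Char := PySem.List.pyGetD g i []

-- 'for c in range(C)': keep (best, lf); lf = leftmost tall-enough column of the current clear run, -1 if none
def bColLoop (rowt rowb : List Char) (vert : List Int) (need bt tp : Int) :
    List Int → Int × Int → Int × Int
  | [], s => s
  | c :: rest, (best, lf) =>
      if pvChr rowt c ≠ '.' ∨ pvChr rowb c ≠ '.' then
        bColLoop rowt rowb vert need bt tp rest (best, -1)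
      else if pvIdx vert c ≥ need then
        if lf ≥ 0 then
          bColLoop rowt rowb vert need bt tp rest
            ((if 2 * ((bt - tp) + (c - lf)) > best then 2 * ((bt - tp) + (c - lf)) else best), lf)
        else bColLoop rowt rowb vert need bt tp rest (best, c)
      else bColLoop rowt rowb vert need bt tp rest (best, lf)

-- 'for tp in range(max(0, bt - mv + 1), bt)': break once even a full-width
-- rectangle for this row pair cannot beat best
def bTpLoop (g : List (List Char)) (rowb : List Char) (vert : List Int) (bt C : Int) :
    List Int → Int → Int
  | [], best => best
  | tp :: rest, best =>
      if 2 * ((bt - tp) + (C - 1)) ≤ best then best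
      else bTpLoop g rowb vert bt C rest
        (bColLoop (pvRowC g tp) rowb vert (bt - tp + 1) bt tp
          (PySem.List.pyRange 0 C 1) (best, -1)).1

-- 'for bt in range(R)': vert[c] = length of the clear run ending at row bt in column c
def bBtLoop (g : List (List Char)) (C : Int) : List Int → List Int → Int → Int
  | [], _, best => best
  | bt :: rest, vert, best =>
      let rowb := pvRowC g bt
      let vert' := (PySem.List.pyRange 0 C 1).map
        (fun c => if pvChr rowb c = '.' then pvIdx vert c + 1 else 0)
      -- mv = max(vert): vert' is nonempty here since this is only reached with C ≥ 2
      let mv := (PySem.List.max? vert' (fun v => v)).getD 0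
      bBtLoop g C rest vert'
        (bTpLoop g rowb vert' bt C
          (PySem.List.pyRange (max 0 (bt - mv + 1)) bt 1) best)

def kmarsh_alt (marsh : List String) : Int :=
  if marsh.length < 2 then 0
  else
    if ((marsh.headD "").length : Int) < 2 then 0
    else bBtLoop (marsh.map String.toList) ((marsh.headD "").length : Int)
      (PySem.List.pyRange 0 ((marsh.length : Int)) 1)
      (List.replicate (marsh.headD "").length 0) 0

-- ===== PRECONDITION & SPEC =====
-- Pre_ excludes exactly the inputs where A raises IndexError: a grid with at least 2 rows
-- whose first row has at least 2 characters but some later row is shorter than the first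
-- (Python's zip truncates and the column-prefix table runs out); B raises IndexError there too.
def Pre_kmarsh (marsh : List String) : Prop :=
  marsh.length < 2 ∨ (marsh.headD "").length < 2 ∨
    ∀ r ∈ marsh, (marsh.headD "").length ≤ r.length
instance (marsh : List String) : Decidable (Pre_kmarsh marsh) := by
  unfold Pre_kmarsh; infer_instance

def pvWitness_kmarsh : List String := ["..", ".."]

def Spec_kmarsh (marsh : List String) (out : Int) : Prop := out = kmarsh_alt marsh
instance (marsh : List String) (out : Int) : Decidable (Spec_kmarsh marsh out) := by
  unfold Spec_kmarsh; infer_instance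

-- ===== CLAIM (what is proved, stated in full; the proofs are below) =====
def Claim_equal_kmarsh : Prop :=
  ∀ (marsh : List String), Dom_kmarsh marsh → Pre_kmarsh marsh → Spec_kmarsh marsh (kmarsh marsh)

-- ===== LEMMAS AND PROOFS =====

-- ---------- spec layer: rectangles with all-clear borders ----------
def pvC (m : List String) : Nat := (m.headD "").length
def pvCell (m : List String) (i j : Nat) : Char := ((m.getD i "").toList).getD j ' '
def pvRowClear (m : List String) (i : Nat) (a : Int) (b : Nat) : Prop :=
  ∀ t : Nat, a ≤ (t : Int) → t ≤ b → pvCell m i t = '.'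
def pvColClear (m : List String) (j : Nat) (a : Int) (b : Nat) : Prop :=
  ∀ t : Nat, a ≤ (t : Int) → t ≤ b → pvCell m t j = '.'
def pvValid (m : List String) (tp lf bt rt : Nat) : Prop :=
  tp < bt ∧ lf < rt ∧ bt < m.length ∧ rt < pvC m ∧
  pvRowClear m tp lf rt ∧ pvRowClear m bt lf rt ∧
  pvColClear m lf tp bt ∧ pvColClear m rt tp bt
def pvPerim (tp lf bt rt : Nat) : Int := 2 * (((bt : Int) - tp) + ((rt : Int) - lf))
def pvSound (m : List String) (p : Int) : Prop :=
  p = 0 ∨ ∃ tp lf bt rt, pvValid m tp lf bt rt ∧ p = pvPerim tp lf bt rt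
def pvIsBest (m : List String) (p : Int) : Prop :=
  0 ≤ p ∧ pvSound m p ∧ ∀ tp lf bt rt, pvValid m tp lf bt rt → pvPerim tp lf bt rt ≤ p

theorem pvIsBest_unique {m : List String} {a b : Int}
    (ha : pvIsBest m a) (hb : pvIsBest m b) : a = b := by
  obtain ⟨ha0, haS, haU⟩ := ha
  obtain ⟨hb0, hbS, hbU⟩ := hb
  have h1 : a ≤ b := by
    rcases haS with h | ⟨tp, lf, bt, rt, hv, rfl⟩
    · omega
    · exact hbU tp lf bt rt hv
  have h2 : b ≤ a := by
    rcases hbS with h | ⟨tp, lf, bt, rt, hv, rfl⟩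
    · omega
    · exact haU tp lf bt rt hv
  omega

-- ---------- prefixes: value/length/characterisation ----------
theorem prefixesGo_length (p : Int) (l : List Char) :
    (prefixesGo p l).length = l.length := by
  induction l generalizing p with
  | nil => rfl
  | cons x xs ih => simp [prefixesGo, ih]

theorem prefixesGo_getD_zero (p : Int) (x : Char) (xs : List Char) :
    (prefixesGo p (x :: xs)).getD 0 0 = if x = '.' then p + 1 else -1 := rfl

theorem prefixesGo_getD_succ (l : List Char) (p : Int) (j : Nat) (hj : j + 1 < l.length) :
    (prefixesGo p l).getD (j + 1) 0 =
      if l.getD (j + 1) ' ' = '.' then (prefixesGo p l).getD j 0 + 1 else -1 := by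
  induction l generalizing p j with
  | nil => simp at hj
  | cons x xs ih =>
    cases j with
    | zero =>
      rcases xs with _ | ⟨y, ys⟩
      · simp at hj
      · simp [prefixesGo]
    | succ j' =>
      have hx : (prefixesGo p (x :: xs)).getD (j' + 1 + 1) 0
          = (prefixesGo (if x = '.' then p + 1 else -1) xs).getD (j' + 1) 0 := by
        simp [prefixesGo]
      rw [hx, ih _ j' (by simpa using hj)]
      simp [prefixesGo]

theorem prefixes_getD_zero (x : Char) (xs : List Char) :
    (prefixes (x :: xs)).getD 0 0 = if x = '.' then 0 else -1 := by
  rw [prefixes, prefixesGo_getD_zero]; split <;> omega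

theorem prefixes_getD_le (l : List Char) (j : Nat) (hj : j < l.length) :
    (prefixes l).getD j 0 ≤ (j : Int) := by
  induction j with
  | zero =>
    rcases l with _ | ⟨x, xs⟩
    · simp at hj
    · rw [prefixes_getD_zero]; split <;> omega
  | succ j' ih =>
    rw [prefixes, prefixesGo_getD_succ _ _ _ hj]
    rw [← prefixes] at *
    have := ih (by omega)
    split <;> push_cast <;> omega

theorem prefixes_ge_iff (l : List Char) :
    ∀ (j : Nat), j < l.length → ∀ (d : Int), d ≤ (j : Int) →
    (d ≤ (prefixes l).getD j 0 ↔
      ∀ t : Nat, (j : Int) - d ≤ (t : Int) → t ≤ j → l.getD t ' ' = '.') := by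
  intro j
  induction j with
  | zero =>
    intro hj d hd
    rcases l with _ | ⟨x, xs⟩
    · simp at hj
    · rw [prefixes_getD_zero]
      by_cases hc : x = '.'
      · rw [if_pos hc]
        constructor
        · intro _ t h1 h2
          have ht : t = 0 := by omega
          subst ht; simpa using hc
        · intro _; omega
      · rw [if_neg hc]
        constructor
        · intro h t h1 h2; omega
        · intro h
          by_contra hlt
          have := h 0 (by omega) (by omega)
          simp at this
          exact hc this
  | succ j' ih =>
    intro hj d hd
    rw [prefixes, prefixesGo_getD_succ _ _ _ hj, ← prefixes]
    by_cases hc : l.getD (j' + 1) ' ' = '.'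
    · rw [if_pos hc]
      have hih := ih (by omega) (d - 1) (by push_cast; omega)
      constructor
      · intro h t h1 h2
        rcases Nat.lt_or_ge t (j' + 1) with ht | ht
        · exact hih.mp (by omega) t (by push_cast at h1 ⊢; omega) (by omega)
        · have : t = j' + 1 := by omega
          subst this; exact hc
      · intro h
        have : d - 1 ≤ (prefixes l).getD j' 0 :=
          hih.mpr (fun t h1 h2 => h t (by push_cast at h1 ⊢; omega) (by omega))
        omega
    · rw [if_neg hc]
      constructor
      · intro h t h1 h2; omega
      · intro h
        by_contra hlt
        exact hc (h (j' + 1) (by push_cast; omega) (by omega))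

-- ---------- pyZipT (Python zip) lemmas ----------
theorem pyZipT_mem_length {α : Type} [Inhabited α] (xss : List (List α)) :
    ∀ ys ∈ pyZipT xss, ys.length = xss.length := by
  fun_induction pyZipT xss with
  | case1 xss h => simp [pyZipT, h]
  | case2 xss h ih =>
    intro ys hys
    rcases List.mem_cons.mp hys with h1 | h1
    · simp [h1]
    · simpa using ih ys h1

theorem pyZipT_cond {α : Type} (xss : List (List α)) (hne : xss ≠ [])
    (hlen : ∀ l ∈ xss, 0 < l.length) :
    ¬(xss = [] ∨ (xss.any fun x => x.isEmpty) = true) := by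
  rintro (rfl | hany)
  · exact hne rfl
  · rw [List.any_eq_true] at hany
    obtain ⟨l, hl, hemp⟩ := hany
    rw [List.isEmpty_iff] at hemp
    subst hemp
    exact absurd (hlen _ hl) (by simp)

theorem pyZipT_getElem? {α : Type} [Inhabited α] (d : α) :
    ∀ (c : Nat) (xss : List (List α)), xss ≠ [] → (∀ l ∈ xss, c < l.length) →
    (pyZipT xss)[c]? = some (xss.map (fun l => l.getD c d)) := by
  intro c
  induction c with
  | zero =>
    intro xss hne hlen
    rw [pyZipT, dif_neg (pyZipT_cond _ hne (fun l hl => hlen l hl))]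
    simp only [List.getElem?_cons_zero, Option.some.injEq]
    apply List.map_congr_left
    intro l hl
    rcases l with _ | ⟨x, xs⟩
    · have := hlen _ hl; simp at this
    · rfl
  | succ c ih =>
    intro xss hne hlen
    rw [pyZipT, dif_neg (pyZipT_cond _ hne (fun l hl => by have := hlen l hl; omega))]
    simp only [List.getElem?_cons_succ]
    rw [ih (xss.map (·.tail)) (by simpa using hne)]
    · simp only [List.map_map, Option.some.injEq]
      apply List.map_congr_left
      intro l hl
      rcases l with _ | ⟨x, xs⟩
      · rfl
      · rfl
    · intro l hl
      simp only [List.mem_map] at hl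
      obtain ⟨l0, hl0, rfl⟩ := hl
      have := hlen _ hl0
      simp only [List.length_tail]
      omega

-- ---------- the prefix tables A builds, and what their entries are ----------
def pvPRL (m : List String) : List (List Int) := m.map (fun r => prefixes r.toList)
def pvPCL (m : List String) : List (List Int) :=
  pyZipT ((pyZipT (m.map String.toList)).map prefixes)
def pvPR (m : List String) (i j : Nat) : Int := (prefixes ((m.getD i "").toList)).getD j 0
def pvColL (m : List String) (j : Nat) : List Char := m.map (fun s => s.toList.getD j ' ')
def pvPC (m : List String) (j i : Nat) : Int := (prefixes (pvColL m j)).getD i 0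

theorem pvColL_length (m : List String) (j : Nat) : (pvColL m j).length = m.length := by
  simp [pvColL]

theorem pvColL_getD (m : List String) (j t : Nat) :
    (pvColL m j).getD t ' ' = pvCell m t j := by
  unfold pvColL pvCell
  rcases h : m[t]? with _ | s <;>
    simp [List.getD_eq_getElem?_getD, List.getElem?_map, h]

theorem pvIdx_PRL (m : List String) (i j : Nat) :
    pvIdx (pvRow (pvPRL m) (i : Int)) (j : Int) = pvPR m i j := by
  unfold pvIdx pvRow pvPRL pvPR
  rw [PySem.List.pyGetD_natCast, PySem.List.pyGetD_natCast]
  rcases h : m[i]? with _ | s <;>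
    simp [List.getD_eq_getElem?_getD, List.getElem?_map, h, prefixes, prefixesGo]

theorem pvIdx_PCL (m : List String) (hp3 : ∀ r ∈ m, pvC m ≤ r.length)
    (i j : Nat) (hi : i < m.length) (hj : j < pvC m) :
    pvIdx (pvRow (pvPCL m) (i : Int)) (j : Int) = pvPC m j i := by
  have hg : (m.map String.toList) ≠ [] := by
    intro h; rw [List.map_eq_nil_iff] at h; subst h; simp at hi
  have hglen : ∀ l ∈ m.map String.toList, j < l.length := by
    intro l hl
    simp only [List.mem_map] at hl
    obtain ⟨s, hs, rfl⟩ := hl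
    have := hp3 s hs
    simp only [String.length_toList]
    omega
  have hcols : (pyZipT (m.map String.toList))[j]? =
      some ((m.map String.toList).map (fun l => l.getD j ' ')) :=
    pyZipT_getElem? ' ' j _ hg hglen
  have hXne : (pyZipT (m.map String.toList)).map prefixes ≠ [] := by
    intro h
    rw [List.map_eq_nil_iff] at h
    rw [h] at hcols
    simp at hcols
  have hXlen : ∀ l ∈ (pyZipT (m.map String.toList)).map prefixes, i < l.length := by
    intro l hl
    simp only [List.mem_map] at hl
    obtain ⟨ys, hys, rfl⟩ := hl
    have h1 := pyZipT_mem_length _ _ hys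
    rw [prefixes, prefixesGo_length, h1]
    simpa using hi
  have houter : (pvPCL m)[i]? =
      some (((pyZipT (m.map String.toList)).map prefixes).map (fun l => l.getD i 0)) :=
    pyZipT_getElem? 0 i _ hXne hXlen
  unfold pvIdx pvRow pvPC
  rw [PySem.List.pyGetD_natCast, PySem.List.pyGetD_natCast]
  have h1 : (pvPCL m).getD i [] =
      ((pyZipT (m.map String.toList)).map prefixes).map (fun l => l.getD i 0) := by
    rw [List.getD_eq_getElem?_getD, houter]; rfl
  rw [h1]
  have hjlt : j < ((pyZipT (m.map String.toList)).map prefixes).length := by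
    have : ((pyZipT (m.map String.toList)).map prefixes)[j]? =
        some (prefixes ((m.map String.toList).map (fun l => l.getD j ' '))) := by
      rw [List.getElem?_map, hcols]; rfl
    have := List.getElem?_eq_some_iff.mp this
    exact this.1
  have h2 : (((pyZipT (m.map String.toList)).map prefixes).map (fun l => l.getD i 0)).getD j 0
      = (prefixes ((m.map String.toList).map (fun l => l.getD j ' '))).getD i 0 := by
    rw [List.getD_eq_getElem?_getD, List.getElem?_map, List.getElem?_map, hcols]
    rfl
  rw [h2]
  have h3 : (m.map String.toList).map (fun l => l.getD j ' ') = pvColL m j := by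
    rw [List.map_map]; rfl
  rw [h3]

theorem pv_getD_mem {m : List String} {i : Nat} (hi : i < m.length) : m.getD i "" ∈ m := by
  rw [List.getD_eq_getElem?_getD, List.getElem?_eq_getElem hi]
  simpa using List.getElem_mem hi

theorem pvPR_ge_iff (m : List String) (hp3 : ∀ r ∈ m, pvC m ≤ r.length)
    (i rt : Nat) (hi : i < m.length) (hrt : rt < pvC m) (d : Int) (hd : d ≤ (rt : Int)) :
    d ≤ pvPR m i rt ↔ pvRowClear m i ((rt : Int) - d) rt := by
  unfold pvPR pvRowClear
  have hlen : rt < ((m.getD i "").toList).length := by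
    have hmem : m.getD i "" ∈ m := pv_getD_mem hi
    have := hp3 _ hmem
    simp only [String.length_toList]
    omega
  rw [prefixes_ge_iff _ rt hlen d hd]
  exact Iff.rfl

theorem pvPC_ge_iff (m : List String) (j bt : Nat) (hbt : bt < m.length)
    (d : Int) (hd : d ≤ (bt : Int)) :
    d ≤ pvPC m j bt ↔ pvColClear m j ((bt : Int) - d) bt := by
  unfold pvPC pvColClear
  rw [prefixes_ge_iff _ bt (by rw [pvColL_length]; exact hbt) d hd]
  constructor <;> intro h t h1 h2
  · rw [← pvColL_getD]; exact h t h1 h2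
  · rw [pvColL_getD]; exact h t h1 h2

theorem pvPR_le (m : List String) (hp3 : ∀ r ∈ m, pvC m ≤ r.length)
    (i rt : Nat) (hi : i < m.length) (hrt : rt < pvC m) : pvPR m i rt ≤ (rt : Int) := by
  unfold pvPR
  apply prefixes_getD_le
  have hmem : m.getD i "" ∈ m := pv_getD_mem hi
  have := hp3 _ hmem
  simp only [String.length_toList]
  omega

theorem pvPC_le (m : List String) (j bt : Nat) (hbt : bt < m.length) :
    pvPC m j bt ≤ (bt : Int) := by
  unfold pvPC
  apply prefixes_getD_le
  rw [pvColL_length]; exact hbt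

-- ---------- A's loops compute the best perimeter ----------
theorem kTpLoop_spec (m : List String) (hp3 : ∀ r ∈ m, pvC m ≤ r.length)
    (bt rt lf : Nat) (hbt : bt < m.length) (hrt : rt < pvC m) (hlf : lf < rt)
    (hbot : pvRowClear m bt (lf : Int) rt) :
    ∀ (tps : List Int), tps.Pairwise (· < ·) →
      (∀ t ∈ tps, 0 ≤ t ∧ t < (bt : Int) ∧ pvColClear m rt t bt) →
      ∀ (acc : Int), 0 ≤ acc → pvSound m acc →
      0 ≤ kTpLoop (pvPRL m) (pvPCL m) bt rt lf tps acc ∧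
      pvSound m (kTpLoop (pvPRL m) (pvPCL m) bt rt lf tps acc) ∧
      acc ≤ kTpLoop (pvPRL m) (pvPCL m) bt rt lf tps acc ∧
      ∀ tp : Nat, (tp : Int) ∈ tps → pvValid m tp lf bt rt →
        pvPerim tp lf bt rt ≤ kTpLoop (pvPRL m) (pvPCL m) bt rt lf tps acc := by
  intro tps
  induction tps with
  | nil =>
    intro _ _ acc h0 hS
    refine ⟨h0, hS, le_refl _, ?_⟩
    intro tp htp; simp at htp
  | cons t rest ih =>
    intro hsort htps acc h0 hS
    obtain ⟨ht0, htb, htc⟩ := htps t (by simp)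
    have htn : t = ((t.toNat : Nat) : Int) := by omega
    set tn := t.toNat with htn'
    have htnb : tn < bt := by omega
    have hacc1 : pvIdx (pvRow (pvPRL m) t) rt = pvPR m tn rt := by
      rw [htn]; exact pvIdx_PRL m tn rt
    have hacc2 : pvIdx (pvRow (pvPCL m) (bt : Int)) (lf : Int) = pvPC m lf bt := by
      exact pvIdx_PCL m hp3 bt lf hbt (by omega)
    -- characterisation facts if the rectangle at tp = tn is valid
    have hvalid_facts : pvValid m tn lf bt rt →
        ((rt : Int) - lf ≤ pvPR m tn rt ∧ (bt : Int) - tn ≤ pvPC m lf bt) := by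
      intro hv
      obtain ⟨_, _, _, _, htop, _, hleft, _⟩ := hv
      constructor
      · rw [pvPR_ge_iff m hp3 tn rt (by omega) hrt _ (by omega)]
        intro u h1 h2
        exact htop u (by omega) h2
      · rw [pvPC_ge_iff m lf bt hbt _ (by omega)]
        intro u h1 h2
        exact hleft u (by omega) h2
    rw [kTpLoop]
    by_cases hb1 : pvIdx (pvRow (pvPRL m) t) rt < 1
    · rw [if_pos hb1]
      obtain ⟨c0, cS, cMono, cCompl⟩ := ih (List.Pairwise.of_cons hsort)
        (fun u hu => htps u (by simp [hu])) acc h0 hS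
      refine ⟨c0, cS, cMono, ?_⟩
      intro tp htp hv
      rcases List.mem_cons.mp htp with heq | hmem
      · exfalso
        have htp' : tp = tn := by omega
        subst htp'
        have := (hvalid_facts hv).1
        rw [hacc1] at hb1
        omega
      · exact cCompl tp hmem hv
    · rw [if_neg hb1]
      by_cases hb2 : pvIdx (pvRow (pvPRL m) t) rt ≥ (rt : Int) - lf ∧
          pvIdx (pvRow (pvPCL m) (bt : Int)) (lf : Int) ≥ (bt : Int) - t
      · rw [if_pos hb2]
        rw [hacc1] at hb2
        rw [hacc2] at hb2
        -- the rectangle (tn, lf, bt, rt) is valid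
        have hvalid : pvValid m tn lf bt rt := by
          refine ⟨htnb, hlf, hbt, hrt, ?_, hbot, ?_, ?_⟩
          · have := (pvPR_ge_iff m hp3 tn rt (by omega) hrt ((rt : Int) - lf)
              (by omega)).mp hb2.1
            intro u h1 h2
            exact this u (by omega) h2
          · have := (pvPC_ge_iff m lf bt hbt ((bt : Int) - tn) (by omega)).mp
              (by rw [← htn]; exact hb2.2)
            intro u h1 h2
            exact this u (by omega) h2
          · intro u h1 h2
            exact htc u (by omega) h2
        have harea : 2 * (((bt : Int) - t) + ((rt : Int) - lf)) = pvPerim tn lf bt rt := by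
          unfold pvPerim; rw [htn]
        constructor
        · split <;> omega
        constructor
        · split
          · right
            exact ⟨tn, lf, bt, rt, hvalid, harea⟩
          · exact hS
        constructor
        · split <;> omega
        · intro tp htp hv
          have htple : t ≤ (tp : Int) := by
            rcases List.mem_cons.mp htp with heq | hmem
            · omega
            · have := (List.pairwise_cons.mp hsort).1 _ hmem
              omega
          have : pvPerim tp lf bt rt ≤ 2 * (((bt : Int) - t) + ((rt : Int) - lf)) := by
            unfold pvPerim; omega
          split <;> omega
      · rw [if_neg hb2]
        obtain ⟨c0, cS, cMono, cCompl⟩ := ih (List.Pairwise.of_cons hsort)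
          (fun u hu => htps u (by simp [hu])) acc h0 hS
        refine ⟨c0, cS, cMono, ?_⟩
        intro tp htp hv
        rcases List.mem_cons.mp htp with heq | hmem
        · exfalso
          have htp' : tp = tn := by omega
          subst htp'
          obtain ⟨hx1, hx2⟩ := hvalid_facts hv
          rw [hacc1, hacc2] at hb2
          exact hb2 ⟨by omega, by omega⟩
        · exact cCompl tp hmem hv

theorem kLfLoop_spec (m : List String) (hp3 : ∀ r ∈ m, pvC m ≤ r.length)
    (bt rt : Nat) (hbt : bt < m.length) (hrt : rt < pvC m) :
    ∀ (lfs : List Int),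
      (∀ l ∈ lfs, 0 ≤ l ∧ l < (rt : Int) ∧ pvRowClear m bt l rt) →
      ∀ (acc : Int), 0 ≤ acc → pvSound m acc →
      0 ≤ kLfLoop (pvPRL m) (pvPCL m) bt rt (pvPC m rt bt) lfs acc ∧
      pvSound m (kLfLoop (pvPRL m) (pvPCL m) bt rt (pvPC m rt bt) lfs acc) ∧
      acc ≤ kLfLoop (pvPRL m) (pvPCL m) bt rt (pvPC m rt bt) lfs acc ∧
      ∀ lf : Nat, (lf : Int) ∈ lfs → ∀ tp : Nat, pvValid m tp lf bt rt →
        pvPerim tp lf bt rt ≤ kLfLoop (pvPRL m) (pvPCL m) bt rt (pvPC m rt bt) lfs acc := by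
  intro lfs
  induction lfs with
  | nil =>
    intro _ acc h0 hS
    refine ⟨h0, hS, le_refl _, ?_⟩
    intro lf hlf; simp at hlf
  | cons l rest ih =>
    intro hlfs acc h0 hS
    obtain ⟨hl0, hlr, hlbot⟩ := hlfs l (by simp)
    have hln : l = ((l.toNat : Nat) : Int) := by omega
    set ln := l.toNat with hln'
    have hlnr : ln < rt := by omega
    have hacc : pvIdx (pvRow (pvPCL m) (bt : Int)) l = pvPC m ln bt := by
      rw [hln]; exact pvIdx_PCL m hp3 bt ln hbt (by omega)
    rw [kLfLoop]
    by_cases hb1 : pvIdx (pvRow (pvPCL m) (bt : Int)) l < 1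
    · rw [if_pos hb1]
      obtain ⟨c0, cS, cMono, cCompl⟩ := ih (fun u hu => hlfs u (by simp [hu])) acc h0 hS
      refine ⟨c0, cS, cMono, ?_⟩
      intro lf hlf tp hv
      rcases List.mem_cons.mp hlf with heq | hmem
      · exfalso
        have hlf' : lf = ln := by omega
        subst hlf'
        obtain ⟨htb, _, _, _, _, _, hleft, _⟩ := hv
        have : (bt : Int) - tp ≤ pvPC m ln bt := by
          rw [pvPC_ge_iff m ln bt hbt _ (by omega)]
          intro u h1 h2
          exact hleft u (by omega) h2
        rw [hacc] at hb1
        omega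
      · exact cCompl lf hmem tp hv
    · rw [if_neg hb1]
      -- run the tp loop, then continue with the rest
      have htpspec := kTpLoop_spec m hp3 bt rt ln hbt hrt hlnr
        (by intro u h1 h2; exact hlbot u (by omega) h2)
        (PySem.List.pyRange ((bt : Int) - pvPC m rt bt) bt 1)
        (PySem.List.pairwise_lt_pyRange_one _ _)
        (by
          intro u hu
          rw [PySem.List.mem_pyRange_one] at hu
          have hple : pvPC m rt bt ≤ (bt : Int) := pvPC_le m rt bt hbt
          refine ⟨by omega, hu.2, ?_⟩
          have : (bt : Int) - u ≤ pvPC m rt bt := by omega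
          have hcc := (pvPC_ge_iff m rt bt hbt ((bt : Int) - u) (by omega)).mp this
          intro v h1 h2
          exact hcc v (by omega) h2)
        acc h0 hS
      obtain ⟨t0, tS, tMono, tCompl⟩ := htpspec
      have hl2 : l = (ln : Int) := hln
      rw [hl2]
      obtain ⟨c0, cS, cMono, cCompl⟩ := ih (fun u hu => hlfs u (by simp [hu])) _ t0 tS
      refine ⟨c0, cS, le_trans tMono cMono, ?_⟩
      intro lf hlf tp hv
      rcases List.mem_cons.mp hlf with heq | hmem
      · have hlf' : lf = ln := by omega
        subst hlf'
        refine le_trans ?_ cMono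
        apply tCompl tp _ hv
        rw [PySem.List.mem_pyRange_one]
        obtain ⟨htb, _, _, _, _, _, _, hright⟩ := hv
        have : (bt : Int) - tp ≤ pvPC m rt bt := by
          rw [pvPC_ge_iff m rt bt hbt _ (by omega)]
          intro u h1 h2
          exact hright u (by omega) h2
        constructor <;> omega
      · exact cCompl lf hmem tp hv

theorem kRtLoop_spec (m : List String) (hp3 : ∀ r ∈ m, pvC m ≤ r.length)
    (bt : Nat) (hbt : bt < m.length) :
    ∀ (rts : List Int),
      (∀ r ∈ rts, 0 ≤ r ∧ r < (pvC m : Int)) →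
      ∀ (acc : Int), 0 ≤ acc → pvSound m acc →
      0 ≤ kRtLoop (pvPRL m) (pvPCL m) bt rts acc ∧
      pvSound m (kRtLoop (pvPRL m) (pvPCL m) bt rts acc) ∧
      acc ≤ kRtLoop (pvPRL m) (pvPCL m) bt rts acc ∧
      ∀ rt : Nat, (rt : Int) ∈ rts → ∀ tp lf : Nat, pvValid m tp lf bt rt →
        pvPerim tp lf bt rt ≤ kRtLoop (pvPRL m) (pvPCL m) bt rts acc := by
  intro rts
  induction rts with
  | nil =>
    intro _ acc h0 hS
    refine ⟨h0, hS, le_refl _, ?_⟩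
    intro rt hrt; simp at hrt
  | cons r rest ih =>
    intro hrts acc h0 hS
    obtain ⟨hr0, hrC⟩ := hrts r (by simp)
    have hrn : r = ((r.toNat : Nat) : Int) := by omega
    set rn := r.toNat with hrn'
    have hrnC : rn < pvC m := by omega
    have hacc1 : pvIdx (pvRow (pvPCL m) (bt : Int)) ((rn : Nat) : Int) = pvPC m rn bt :=
      pvIdx_PCL m hp3 bt rn hbt (by omega)
    have hacc2 : pvIdx (pvRow (pvPRL m) (bt : Int)) ((rn : Nat) : Int) = pvPR m bt rn :=
      pvIdx_PRL m bt rn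
    -- characterisations of a valid rectangle with right edge rn
    have hvfacts : ∀ tp lf : Nat, pvValid m tp lf bt rn →
        (bt : Int) - tp ≤ pvPC m rn bt ∧ (rn : Int) - lf ≤ pvPR m bt rn := by
      intro tp lf hv
      obtain ⟨htb, hlr, _, _, _, hbot, _, hright⟩ := hv
      constructor
      · rw [pvPC_ge_iff m rn bt hbt _ (by omega)]
        intro u h1 h2
        exact hright u (by omega) h2
      · rw [pvPR_ge_iff m hp3 bt rn hbt hrnC _ (by omega)]
        intro u h1 h2
        exact hbot u (by omega) h2
    rw [kRtLoop, hrn]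
    by_cases hb1 : pvIdx (pvRow (pvPCL m) (bt : Int)) ((rn : Nat) : Int) < 1 ∨
        pvIdx (pvRow (pvPRL m) (bt : Int)) ((rn : Nat) : Int) < 1 ∨
        2 * (pvIdx (pvRow (pvPCL m) (bt : Int)) ((rn : Nat) : Int) +
          pvIdx (pvRow (pvPRL m) (bt : Int)) ((rn : Nat) : Int)) < acc
    · rw [if_pos hb1]
      obtain ⟨c0, cS, cMono, cCompl⟩ := ih (fun u hu => hrts u (by simp [hu])) acc h0 hS
      refine ⟨c0, cS, cMono, ?_⟩
      intro rt hrtm tp lf hv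
      rcases List.mem_cons.mp hrtm with heq | hmem
      · have hrt' : rt = rn := by omega
        subst hrt'
        obtain ⟨hx1, hx2⟩ := hvfacts tp lf hv
        rw [hacc1, hacc2] at hb1
        obtain ⟨htb, hlr, _, _, _, _, _, _⟩ := hv
        have hperim : pvPerim tp lf bt rn ≤ 2 * (pvPC m rn bt + pvPR m bt rn) := by
          unfold pvPerim; omega
        rcases hb1 with h | h | h
        · omega
        · omega
        · omega
      · exact cCompl rt hmem tp lf hv
    · rw [if_neg hb1]
      rw [hacc1, hacc2] at hb1
      push_neg at hb1
      have hlfspec := kLfLoop_spec m hp3 bt rn hbt hrnC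
        (PySem.List.pyRange (((rn : Nat) : Int) - pvIdx (pvRow (pvPRL m) (bt : Int)) ((rn : Nat) : Int)) ((rn : Nat) : Int) 1)
        (by
          intro u hu
          rw [PySem.List.mem_pyRange_one] at hu
          rw [hacc2] at hu
          have hwle : pvPR m bt rn ≤ (rn : Int) := pvPR_le m hp3 bt rn hbt hrnC
          refine ⟨by omega, by omega, ?_⟩
          have : (rn : Int) - u ≤ pvPR m bt rn := by omega
          have hcc := (pvPR_ge_iff m hp3 bt rn hbt hrnC ((rn : Int) - u) (by omega)).mp this
          intro v h1 h2
          exact hcc v (by omega) h2)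
        acc h0 hS
      rw [hacc1]
      obtain ⟨t0, tS, tMono, tCompl⟩ := hlfspec
      obtain ⟨c0, cS, cMono, cCompl⟩ := ih (fun u hu => hrts u (by simp [hu])) _ t0 tS
      refine ⟨c0, cS, le_trans tMono cMono, ?_⟩
      intro rt hrtm tp lf hv
      rcases List.mem_cons.mp hrtm with heq | hmem
      · have hrt' : rt = rn := by omega
        subst hrt'
        refine le_trans ?_ cMono
        apply tCompl lf _ tp hv
        rw [PySem.List.mem_pyRange_one, hacc2]
        obtain ⟨hx1, hx2⟩ := hvfacts tp lf hv
        obtain ⟨htb, hlr, _, _, _, _, _, _⟩ := hv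
        constructor <;> omega
      · exact cCompl rt hmem tp lf hv

theorem kBtLoop_spec (m : List String) (hp3 : ∀ r ∈ m, pvC m ≤ r.length)
    (rts : List Int) (hrts : ∀ r ∈ rts, 0 ≤ r ∧ r < (pvC m : Int)) :
    ∀ (bts : List Int),
      (∀ b ∈ bts, 0 ≤ b ∧ b < (m.length : Int)) →
      ∀ (acc : Int), 0 ≤ acc → pvSound m acc →
      0 ≤ kBtLoop (pvPRL m) (pvPCL m) rts bts acc ∧
      pvSound m (kBtLoop (pvPRL m) (pvPCL m) rts bts acc) ∧
      acc ≤ kBtLoop (pvPRL m) (pvPCL m) rts bts acc ∧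
      ∀ bt rt tp lf : Nat, (bt : Int) ∈ bts → (rt : Int) ∈ rts →
        pvValid m tp lf bt rt →
        pvPerim tp lf bt rt ≤ kBtLoop (pvPRL m) (pvPCL m) rts bts acc := by
  intro bts
  induction bts with
  | nil =>
    intro _ acc h0 hS
    refine ⟨h0, hS, le_refl _, ?_⟩
    intro bt rt tp lf hbt; simp at hbt
  | cons b rest ih =>
    intro hbts acc h0 hS
    obtain ⟨hb0, hbR⟩ := hbts b (by simp)
    have hbn : b = ((b.toNat : Nat) : Int) := by omega
    set bn := b.toNat with hbn'
    have hbnR : bn < m.length := by omega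
    rw [kBtLoop, hbn]
    obtain ⟨t0, tS, tMono, tCompl⟩ := kRtLoop_spec m hp3 bn hbnR rts hrts acc h0 hS
    obtain ⟨c0, cS, cMono, cCompl⟩ := ih (fun u hu => hbts u (by simp [hu])) _ t0 tS
    refine ⟨c0, cS, le_trans tMono cMono, ?_⟩
    intro bt rt tp lf hbtm hrtm hv
    rcases List.mem_cons.mp hbtm with heq | hmem
    · have hbt' : bt = bn := by omega
      subst hbt'
      exact le_trans (tCompl rt hrtm tp lf hv) cMono
    · exact cCompl bt rt tp lf hmem hrtm hv

-- ---------- B's sweep computes the best perimeter ----------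
def pvVP (m : List String) : Nat → Nat → Int
  | 0, _ => 0
  | b + 1, c => pvPC m c b + 1

theorem pvPC_zero (m : List String) (c : Nat) (h : 0 < m.length) :
    pvPC m c 0 = if pvCell m 0 c = '.' then 0 else -1 := by
  unfold pvPC
  rcases hc : pvColL m c with _ | ⟨y, ys⟩
  · have hl := pvColL_length m c
    rw [hc] at hl
    simp at hl
    omega
  · rw [prefixes_getD_zero]
    have hy : y = pvCell m 0 c := by
      have := pvColL_getD m c 0
      rw [hc] at this
      simpa using this
    rw [hy]

theorem pvPC_succ (m : List String) (c b : Nat) (h : b + 1 < m.length) :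
    pvPC m c (b + 1) = if pvCell m (b + 1) c = '.' then pvPC m c b + 1 else -1 := by
  unfold pvPC
  rw [prefixes, prefixesGo_getD_succ _ _ _ (by rw [pvColL_length]; omega), ← prefixes]
  rw [pvColL_getD]

theorem pvRowC_eq (m : List String) (i : Nat) :
    pvRowC (m.map String.toList) ((i : Nat) : Int) = (m.getD i "").toList := by
  unfold pvRowC
  rw [PySem.List.pyGetD_natCast]
  rcases h : m[i]? with _ | s <;>
    simp [List.getD_eq_getElem?_getD, List.getElem?_map, h]

theorem pvChr_cell (m : List String) (i c : Nat) :
    pvChr ((m.getD i "").toList) ((c : Nat) : Int) = pvCell m i c := by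
  unfold pvChr pvCell
  rw [PySem.List.pyGetD_natCast]

theorem pvVert_step (m : List String) (b : Nat) (hb : b < m.length) (vert : List Int)
    (hv : ∀ c : Nat, c < pvC m → pvIdx vert ((c : Nat) : Int) = pvVP m b c) :
    ∀ c : Nat, c < pvC m →
      pvIdx ((PySem.List.pyRange 0 ((pvC m : Nat) : Int) 1).map
        (fun c => if pvChr (pvRowC (m.map String.toList) ((b : Nat) : Int)) c = '.'
                  then pvIdx vert c + 1 else 0)) ((c : Nat) : Int) = pvVP m (b + 1) c := by
  intro c hc
  unfold pvIdx
  rw [PySem.List.pyGetD_map_pyRange _ (pvC m) c 0 hc]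
  show (if pvChr (pvRowC (m.map String.toList) ((b : Nat) : Int)) ((c : Nat) : Int) = '.'
        then PySem.List.pyGetD vert ((c : Nat) : Int) 0 + 1 else 0) = pvVP m (b + 1) c
  rw [pvRowC_eq, pvChr_cell]
  have hvc : PySem.List.pyGetD vert ((c : Nat) : Int) 0 = pvVP m b c := hv c hc
  rw [hvc]
  cases b with
  | zero =>
    show (if pvCell m 0 c = '.' then pvVP m 0 c + 1 else 0) = pvPC m c 0 + 1
    rw [pvPC_zero m c hb]
    show (if pvCell m 0 c = '.' then (0 : Int) + 1 else 0) = _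
    split_ifs <;> omega
  | succ b' =>
    show (if pvCell m (b' + 1) c = '.' then pvVP m (b' + 1) c + 1 else 0) = pvPC m c (b' + 1) + 1
    rw [pvPC_succ m c b' hb]
    show (if pvCell m (b' + 1) c = '.' then pvPC m c b' + 1 + 1 else 0) = _
    split_ifs <;> omega

-- candidate left edge l for the current run, having processed columns [0, a)
def pvCand (m : List String) (tp bt a l : Nat) : Prop :=
  (bt : Int) - tp ≤ pvPC m l bt ∧
  ∀ t : Nat, l ≤ t → t < a → (pvCell m tp t = '.' ∧ pvCell m bt t = '.')

def pvInv (m : List String) (tp bt : Nat) (base : Int) (a : Nat) (s : Int × Int) : Prop :=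
  0 ≤ s.1 ∧ pvSound m s.1 ∧ base ≤ s.1 ∧
  (∀ l r : Nat, r < a → pvValid m tp l bt r → pvPerim tp l bt r ≤ s.1) ∧
  (s.2 = -1 ∨ (0 ≤ s.2 ∧ s.2 < (a : Int) ∧ pvCand m tp bt a s.2.toNat)) ∧
  (∀ l : Nat, l < a → pvCand m tp bt a l → 0 ≤ s.2 ∧ s.2 ≤ (l : Int))

theorem bColLoop_inv (m : List String) (tp bt : Nat) (htb : tp < bt) (hbt : bt < m.length)
    (vert : List Int)
    (hv : ∀ c : Nat, c < pvC m → pvIdx vert ((c : Nat) : Int) = pvPC m c bt + 1)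
    (base : Int) :
    ∀ (k a : Nat), a + k = pvC m → ∀ s : Int × Int, pvInv m tp bt base a s →
      pvInv m tp bt base (pvC m)
        (bColLoop ((m.getD tp "").toList) ((m.getD bt "").toList) vert
          ((bt : Int) - (tp : Int) + 1) ((bt : Nat) : Int) ((tp : Nat) : Int)
          (PySem.List.pyRange ((a : Nat) : Int) ((pvC m : Nat) : Int) 1) s) := by
  intro k
  induction k with
  | zero =>
    intro a ha s hs
    rw [PySem.List.pyRange_one_eq_nil (by omega)]
    have haC : a = pvC m := by omega
    rw [bColLoop]
    rwa [haC] at hs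
  | succ k ih =>
    intro a ha s hs
    have haC : a < pvC m := by omega
    rw [PySem.List.pyRange_one_cons (by exact_mod_cast haC)]
    have hcast : ((a : Nat) : Int) + 1 = (((a + 1 : Nat)) : Int) := by push_cast; ring
    obtain ⟨best, lf⟩ := s
    obtain ⟨h1, h2, h3, h4, h5, h6⟩ := hs
    rw [bColLoop]
    rw [pvChr_cell, pvChr_cell]
    have hvert_val : pvIdx vert ((a : Nat) : Int) = pvPC m a bt + 1 := hv a haC
    -- the vertical-run test at column a means the column is clear from tp to bt
    have hvert_iff : ((bt : Int) - tp ≤ pvPC m a bt) ↔ pvColClear m a (tp : Int) bt := by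
      rw [pvPC_ge_iff m a bt hbt _ (by omega)]
      constructor <;> intro hcc u hu1 hu2 <;> exact hcc u (by omega) hu2
    by_cases hblock : ¬ (pvCell m tp a = '.') ∨ ¬ (pvCell m bt a = '.')
    · rw [if_pos hblock]
      rw [hcast]
      apply ih (a + 1) (by omega)
      refine ⟨h1, h2, h3, ?_, Or.inl rfl, ?_⟩
      · intro l r hr hvd
        rcases Nat.lt_or_ge r a with hra | hra
        · exact h4 l r hra hvd
        · exfalso
          have hr' : a = r := by omega
          subst hr'
          obtain ⟨_, hlr, _, _, htop, hbot, _, _⟩ := hvd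
          exact hblock.elim (fun h => h (htop a (by omega) (by omega)))
            (fun h => h (hbot a (by omega) (by omega)))
      · intro l hl hcand
        exfalso
        have := hcand.2 a (by omega) (by omega)
        exact hblock.elim (fun h => h this.1) (fun h => h this.2)
    · rw [if_neg hblock]
      push_neg at hblock
      obtain ⟨hct, hcb⟩ := hblock
      by_cases hvt : pvIdx vert ((a : Nat) : Int) ≥ (bt : Int) - (tp : Int) + 1
      · rw [if_pos hvt]
        rw [hvert_val] at hvt
        have hvclear : pvColClear m a (tp : Int) bt := hvert_iff.mp (by omega)
        by_cases hlf : lf ≥ 0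
        · rw [if_pos hlf]
          -- lf is a genuine candidate: update best with the rectangle (tp, lf, bt, a)
          rcases h5 with h5 | ⟨_, hlfa, hcand⟩
          · omega
          have hlfn : lf = ((lf.toNat : Nat) : Int) := by omega
          set ln := lf.toNat with hln'
          have hlna : ln < a := by omega
          -- rectangle (tp, ln, bt, a) is valid
          have hvnew : pvValid m tp ln bt a := by
            refine ⟨htb, hlna, hbt, haC, ?_, ?_, ?_, hvclear⟩
            · intro t ht1 ht2
              rcases Nat.lt_or_ge t a with h | h
              · exact (hcand.2 t (by omega) h).1
              · have : a = t := by omega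
                subst this; exact hct
            · intro t ht1 ht2
              rcases Nat.lt_or_ge t a with h | h
              · exact (hcand.2 t (by omega) h).2
              · have : a = t := by omega
                subst this; exact hcb
            · have := (pvPC_ge_iff m ln bt hbt ((bt : Int) - tp) (by omega)).mp hcand.1
              intro u h1' h2'
              exact this u (by omega) h2'
          have hperim : 2 * (((bt : Int) - tp) + (((a : Nat) : Int) - lf)) =
              pvPerim tp ln bt a := by
            unfold pvPerim; omega
          rw [hcast]
          apply ih (a + 1) (by omega)
          constructor
          · dsimp only; split <;> omega
          constructor
          · dsimp only
            split
            · exact Or.inr ⟨tp, ln, bt, a, hvnew, hperim⟩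
            · exact h2
          constructor
          · dsimp only; split <;> omega
          constructor
          · intro l r hr hvd
            dsimp only
            rcases Nat.lt_or_ge r a with hra | hra
            · have := h4 l r hra hvd
              split <;> omega
            · have hr' : a = r := by omega
              subst hr'
              -- l is a candidate at a, hence lf ≤ l and the new best dominates
              obtain ⟨_, hlr, _, _, htop, hbot, hleft, _⟩ := hvd
              have hcl : pvCand m tp bt a l := by
                constructor
                · rw [pvPC_ge_iff m l bt hbt _ (by omega)]
                  intro u h1' h2'
                  exact hleft u (by omega) h2'
                · intro t ht1 ht2
                  exact ⟨htop t (by omega) (by omega), hbot t (by omega) (by omega)⟩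
              have hle := (h6 l hlr hcl).2
              have : pvPerim tp l bt a ≤ 2 * (((bt : Int) - tp) + (((a : Nat) : Int) - lf)) := by
                unfold pvPerim; omega
              split <;> omega
          constructor
          · refine Or.inr ⟨by omega, by omega, ?_⟩
            refine ⟨hcand.1, ?_⟩
            intro t ht1 ht2
            rcases Nat.lt_or_ge t a with h | h
            · exact hcand.2 t ht1 h
            · have : a = t := by omega
              subst this; exact ⟨hct, hcb⟩
          · intro l hl hcl
            rcases Nat.lt_or_ge l a with h | h
            · have := h6 l h ⟨hcl.1, fun t ht1 ht2 => hcl.2 t ht1 (by omega)⟩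
              exact ⟨this.1, this.2⟩
            · have heq : l = a := by omega
              exact ⟨by omega, by omega⟩
        · rw [if_neg hlf]
          -- no candidate yet: column a becomes the leftmost candidate
          have hlf1 : lf = -1 := by
            rcases h5 with h5 | ⟨h5a, _, _⟩
            · exact h5
            · omega
          rw [hcast]
          apply ih (a + 1) (by omega)
          refine ⟨h1, h2, h3, ?_, ?_, ?_⟩
          · intro l r hr hvd
            rcases Nat.lt_or_ge r a with hra | hra
            · exact h4 l r hra hvd
            · exfalso
              have hr' : a = r := by omega
              subst hr'
              obtain ⟨_, hlr, _, _, htop, hbot, hleft, _⟩ := hvd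
              have hcl : pvCand m tp bt a l := by
                constructor
                · rw [pvPC_ge_iff m l bt hbt _ (by omega)]
                  intro u h1' h2'
                  exact hleft u (by omega) h2'
                · intro t ht1 ht2
                  exact ⟨htop t (by omega) (by omega), hbot t (by omega) (by omega)⟩
              have := (h6 l hlr hcl).1
              omega
          · refine Or.inr ⟨by omega, by omega, ?_⟩
            refine ⟨by simpa using (by omega : (bt : Int) - tp ≤ pvPC m a bt), ?_⟩
            intro t ht1 ht2
            have : a = t := by omega
            subst this; exact ⟨hct, hcb⟩
          · intro l hl hcl
            rcases Nat.lt_or_ge l a with h | h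
            · exfalso
              have hcl' : pvCand m tp bt a l :=
                ⟨hcl.1, fun t ht1 ht2 => hcl.2 t ht1 (by omega)⟩
              have := (h6 l h hcl').1
              omega
            · have heq : l = a := by omega
              exact ⟨by omega, by omega⟩
      · rw [if_neg hvt]
        rw [hvert_val] at hvt
        rw [hcast]
        apply ih (a + 1) (by omega)
        refine ⟨h1, h2, h3, ?_, ?_, ?_⟩
        · intro l r hr hvd
          rcases Nat.lt_or_ge r a with hra | hra
          · exact h4 l r hra hvd
          · exfalso
            have hr' : a = r := by omega
            subst hr'
            obtain ⟨_, _, _, _, _, _, _, hright⟩ := hvd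
            have : (bt : Int) - tp ≤ pvPC m a bt := hvert_iff.mpr
              (fun u hu1 hu2 => hright u (by omega) hu2)
            omega
        · rcases h5 with h5 | ⟨h5a, h5b, h5c⟩
          · exact Or.inl h5
          · refine Or.inr ⟨h5a, by omega, ?_⟩
            refine ⟨h5c.1, ?_⟩
            intro t ht1 ht2
            rcases Nat.lt_or_ge t a with h | h
            · exact h5c.2 t ht1 h
            · have : a = t := by omega
              subst this; exact ⟨hct, hcb⟩
        · intro l hl hcl
          rcases Nat.lt_or_ge l a with h | h
          · exact h6 l h ⟨hcl.1, fun t ht1 ht2 => hcl.2 t ht1 (by omega)⟩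
          · exfalso
            have heq : l = a := by omega
            have h2' := hcl.1
            rw [heq] at h2'
            omega

theorem bTpLoop_spec (m : List String) (bt : Nat) (hbt : bt < m.length)
    (vert : List Int)
    (hv : ∀ c : Nat, c < pvC m → pvIdx vert ((c : Nat) : Int) = pvPC m c bt + 1) :
    ∀ (tps : List Int), tps.Pairwise (· < ·) → (∀ t ∈ tps, 0 ≤ t ∧ t < (bt : Int)) →
    ∀ (best : Int), 0 ≤ best → pvSound m best →
    0 ≤ bTpLoop (m.map String.toList) ((m.getD bt "").toList) vert ((bt : Nat) : Int)
        ((pvC m : Nat) : Int) tps best ∧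
    pvSound m (bTpLoop (m.map String.toList) ((m.getD bt "").toList) vert ((bt : Nat) : Int)
        ((pvC m : Nat) : Int) tps best) ∧
    best ≤ bTpLoop (m.map String.toList) ((m.getD bt "").toList) vert ((bt : Nat) : Int)
        ((pvC m : Nat) : Int) tps best ∧
    ∀ tp : Nat, (tp : Int) ∈ tps → ∀ l r : Nat, pvValid m tp l bt r →
      pvPerim tp l bt r ≤ bTpLoop (m.map String.toList) ((m.getD bt "").toList) vert
        ((bt : Nat) : Int) ((pvC m : Nat) : Int) tps best := by
  intro tps
  induction tps with
  | nil =>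
    intro _ _ best h0 hS
    refine ⟨h0, hS, le_refl _, ?_⟩
    intro tp htp; simp at htp
  | cons t rest ih =>
    intro hsort htps best h0 hS
    obtain ⟨ht0, htb⟩ := htps t (by simp)
    rw [bTpLoop]
    by_cases hbound : 2 * (((bt : Nat) : Int) - t + (((pvC m : Nat) : Int) - 1)) ≤ best
    · rw [if_pos hbound]
      refine ⟨h0, hS, le_refl _, ?_⟩
      intro tp htp l r hvd
      have htle : t ≤ (tp : Int) := by
        rcases List.mem_cons.mp htp with heq | hmem
        · omega
        · have := (List.pairwise_cons.mp hsort).1 _ hmem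
          omega
      obtain ⟨_, hlr, _, hrC, _, _, _, _⟩ := hvd
      unfold pvPerim
      omega
    · rw [if_neg hbound]
      have htn : t = ((t.toNat : Nat) : Int) := by omega
      set tn := t.toNat with htn'
      have htnb : tn < bt := by omega
      rw [htn, pvRowC_eq m tn]
      have hinv := bColLoop_inv m tn bt htnb hbt vert hv best (pvC m) 0 (by omega)
        (best, -1)
        ⟨h0, hS, le_refl _, by intro l r hr; omega, Or.inl rfl, by intro l hl; omega⟩
      simp only [Nat.cast_zero] at hinv
      obtain ⟨i1, i2, i3, i4, _, _⟩ := hinv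
      obtain ⟨c0, cS, cMono, cCompl⟩ := ih (List.Pairwise.of_cons hsort)
        (fun u hu => htps u (by simp [hu])) _ i1 i2
      refine ⟨c0, cS, le_trans i3 cMono, ?_⟩
      intro tp htp l r hvd
      rcases List.mem_cons.mp htp with heq | hmem
      · have htp' : tp = tn := by omega
        subst htp'
        refine le_trans (i4 l r ?_ hvd) cMono
        exact hvd.2.2.2.1
      · exact cCompl tp hmem l r hvd

theorem bBtLoop_spec (m : List String) :
    ∀ (k b : Nat), b + k = m.length →
    ∀ (vert : List Int), (∀ c : Nat, c < pvC m → pvIdx vert ((c : Nat) : Int) = pvVP m b c) →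
    ∀ (best : Int), 0 ≤ best → pvSound m best →
    0 ≤ bBtLoop (m.map String.toList) ((pvC m : Nat) : Int)
        (PySem.List.pyRange ((b : Nat) : Int) ((m.length : Nat) : Int) 1) vert best ∧
    pvSound m (bBtLoop (m.map String.toList) ((pvC m : Nat) : Int)
        (PySem.List.pyRange ((b : Nat) : Int) ((m.length : Nat) : Int) 1) vert best) ∧
    best ≤ bBtLoop (m.map String.toList) ((pvC m : Nat) : Int)
        (PySem.List.pyRange ((b : Nat) : Int) ((m.length : Nat) : Int) 1) vert best ∧
    ∀ tp l bt r : Nat, b ≤ bt → pvValid m tp l bt r →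
      pvPerim tp l bt r ≤ bBtLoop (m.map String.toList) ((pvC m : Nat) : Int)
        (PySem.List.pyRange ((b : Nat) : Int) ((m.length : Nat) : Int) 1) vert best := by
  intro k
  induction k with
  | zero =>
    intro b hb vert hv best h0 hS
    rw [PySem.List.pyRange_one_eq_nil (by omega)]
    refine ⟨h0, hS, le_refl _, ?_⟩
    intro tp l bt r hble hvd
    exfalso
    have := hvd.2.2.1
    omega
  | succ k ih =>
    intro b hb vert hv best h0 hS
    have hbR : b < m.length := by omega
    rw [PySem.List.pyRange_one_cons (by exact_mod_cast hbR)]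
    have hcast : ((b : Nat) : Int) + 1 = (((b + 1 : Nat)) : Int) := by push_cast; ring
    rw [bBtLoop]
    have hv' := pvVert_step m b hbR vert hv
    rw [pvRowC_eq m b] at hv' ⊢
    have hv'' : ∀ c : Nat, c < pvC m →
        pvIdx ((PySem.List.pyRange 0 ((pvC m : Nat) : Int) 1).map
          (fun c => if pvChr ((m.getD b "").toList) c = '.' then pvIdx vert c + 1 else 0))
          ((c : Nat) : Int) = pvPC m c b + 1 := by
      intro c hc
      rw [hv' c hc]
      rfl
    -- each entry of the new vert is at most mv = max(vert)
    have hlenv : ((PySem.List.pyRange 0 ((pvC m : Nat) : Int) 1).map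
        (fun c => if pvChr ((m.getD b "").toList) c = '.' then pvIdx vert c + 1 else 0)).length
        = pvC m := by
      rw [List.length_map, PySem.List.length_pyRange_one]
      omega
    have hmv : ∀ c : Nat, c < pvC m →
        pvIdx ((PySem.List.pyRange 0 ((pvC m : Nat) : Int) 1).map
          (fun c => if pvChr ((m.getD b "").toList) c = '.' then pvIdx vert c + 1 else 0))
          ((c : Nat) : Int)
        ≤ (PySem.List.max? ((PySem.List.pyRange 0 ((pvC m : Nat) : Int) 1).map
            (fun c => if pvChr ((m.getD b "").toList) c = '.' then pvIdx vert c + 1 else 0))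
            (fun v => v)).getD 0 := by
      intro c hc
      set L := (PySem.List.pyRange 0 ((pvC m : Nat) : Int) 1).map
        (fun c => if pvChr ((m.getD b "").toList) c = '.' then pvIdx vert c + 1 else 0) with hL
      rcases hmax : PySem.List.max? L (fun v => v) with _ | mx
      · exfalso
        rw [PySem.List.max?_eq_none_iff] at hmax
        rw [hmax] at hlenv
        simp at hlenv
        omega
      · have hclen : c < L.length := by omega
        have hmem : L.getD c 0 ∈ L := by
          rw [List.getD_eq_getElem?_getD, List.getElem?_eq_getElem hclen]
          simpa using List.getElem_mem hclen
        have := PySem.List.max?_isMax hmax _ hmem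
        unfold pvIdx
        rw [PySem.List.pyGetD_natCast]
        simpa using this
    have htp := bTpLoop_spec m b hbR _ hv''
      (PySem.List.pyRange (max 0 (((b : Nat) : Int) -
        (PySem.List.max? ((PySem.List.pyRange 0 ((pvC m : Nat) : Int) 1).map
          (fun c => if pvChr ((m.getD b "").toList) c = '.' then pvIdx vert c + 1 else 0))
          (fun v => v)).getD 0 + 1)) ((b : Nat) : Int) 1)
      (PySem.List.pairwise_lt_pyRange_one _ _)
      (by
        intro u hu
        rw [PySem.List.mem_pyRange_one] at hu
        constructor
        · exact le_trans (le_max_left _ _) hu.1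
        · exact hu.2)
      best h0 hS
    obtain ⟨t0, tS, tMono, tCompl⟩ := htp
    have hvnext : ∀ c : Nat, c < pvC m →
        pvIdx ((PySem.List.pyRange 0 ((pvC m : Nat) : Int) 1).map
          (fun c => if pvChr ((m.getD b "").toList) c = '.' then pvIdx vert c + 1 else 0))
          ((c : Nat) : Int) = pvVP m (b + 1) c := hv'
    rw [hcast]
    obtain ⟨c0, cS, cMono, cCompl⟩ := ih (b + 1) (by omega) _ hvnext _ t0 tS
    refine ⟨c0, cS, le_trans tMono cMono, ?_⟩
    intro tp l bt r hble hvd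
    rcases Nat.lt_or_ge b bt with hlt | hge
    · exact cCompl tp l bt r (by omega) hvd
    · have hbt' : b = bt := by omega
      subst hbt'
      refine le_trans (tCompl tp ?_ l r hvd) cMono
      rw [PySem.List.mem_pyRange_one]
      obtain ⟨htb, hlr, _, hrC, _, _, _, hright⟩ := hvd
      -- the right column's vertical run reaches from tp to b, so mv bounds force tp into range
      have hcol : ((b : Int) - tp) ≤ pvPC m r b := by
        rw [pvPC_ge_iff m r b hbR _ (by omega)]
        intro u h1 h2
        exact hright u (by omega) h2
      have hval := hv'' r hrC
      have hle := hmv r hrC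
      rw [hval] at hle
      constructor
      · have h0tp : (0 : Int) ≤ (tp : Int) := by omega
        have : ((b : Nat) : Int) - (PySem.List.max? ((PySem.List.pyRange 0 ((pvC m : Nat) : Int) 1).map
            (fun c => if pvChr ((m.getD b "").toList) c = '.' then pvIdx vert c + 1 else 0))
            (fun v => v)).getD 0 + 1 ≤ (tp : Int) := by omega
        omega
      · omega

theorem kmarsh_alt_isBest (m : List String) (hR : 2 ≤ m.length) (hC : 2 ≤ pvC m) :
    pvIsBest m (kmarsh_alt m) := by
  unfold kmarsh_alt
  rw [if_neg (by omega)]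
  rw [if_neg (by
    show ¬ (((m.headD "").length : Int) < 2)
    have : (m.headD "").length = pvC m := rfl
    omega)]
  have hv0 : ∀ c : Nat, c < pvC m →
      pvIdx (List.replicate (m.headD "").length (0 : Int)) ((c : Nat) : Int) = pvVP m 0 c := by
    intro c hc
    unfold pvIdx
    rw [PySem.List.pyGetD_natCast]
    have : c < (m.headD "").length := hc
    rw [List.getD_eq_getElem?_getD, List.getElem?_replicate]
    simp [← List.headD_eq_head?_getD, this, pvVP]
  have spec := bBtLoop_spec m m.length 0 (by omega) _ hv0 0 (le_refl _) (Or.inl rfl)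
  simp only [Nat.cast_zero] at spec
  obtain ⟨s0, sS, _, sCompl⟩ := spec
  exact ⟨s0, sS, fun tp lf bt rt hv => sCompl tp lf bt rt (by omega) hv⟩

theorem kmarsh_isBest (m : List String) (hp3 : ∀ r ∈ m, pvC m ≤ r.length) :
    pvIsBest m (kmarsh m) := by
  show pvIsBest m (kBtLoop (pvPRL m) (pvPCL m)
    (PySem.List.pyRange 1 ((pvC m : Nat) : Int) 1)
    (PySem.List.pyRange 1 ((m.length : Nat) : Int) 1) 0)
  have spec := kBtLoop_spec m hp3 (PySem.List.pyRange 1 ((pvC m : Nat) : Int) 1)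
    (by
      intro r hr
      rw [PySem.List.mem_pyRange_one] at hr
      exact ⟨by omega, hr.2⟩)
    (PySem.List.pyRange 1 ((m.length : Nat) : Int) 1)
    (by
      intro b hbm
      rw [PySem.List.mem_pyRange_one] at hbm
      exact ⟨by omega, hbm.2⟩)
    0 (le_refl _) (Or.inl rfl)
  obtain ⟨s0, sS, _, sCompl⟩ := spec
  refine ⟨s0, sS, ?_⟩
  intro tp lf bt rt hv
  refine sCompl bt rt tp lf ?_ ?_ hv
  · rw [PySem.List.mem_pyRange_one]
    have h1 := hv.1
    have h2 := hv.2.2.1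
    constructor <;> omega
  · rw [PySem.List.mem_pyRange_one]
    have h1 := hv.2.1
    have h2 := hv.2.2.2.1
    constructor <;> omega

theorem kBtLoop_rts_nil (pr pc : List (List Int)) :
    ∀ (bts : List Int) (acc : Int), kBtLoop pr pc [] bts acc = acc := by
  intro bts
  induction bts with
  | nil => intro acc; rfl
  | cons b rest ih => intro acc; rw [kBtLoop]; exact ih _

theorem kmarsh_degen (m : List String) (h : m.length < 2 ∨ pvC m < 2) : kmarsh m = 0 := by
  show kBtLoop (pvPRL m) (pvPCL m)
    (PySem.List.pyRange 1 ((pvC m : Nat) : Int) 1)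
    (PySem.List.pyRange 1 ((m.length : Nat) : Int) 1) 0 = 0
  rcases h with h | h
  · rw [PySem.List.pyRange_one_eq_nil (b := ((m.length : Nat) : Int)) (by omega)]
    rfl
  · rw [PySem.List.pyRange_one_eq_nil (b := ((pvC m : Nat) : Int)) (by omega)]
    exact kBtLoop_rts_nil _ _ _ _

theorem kmarsh_alt_degen (m : List String) (h : m.length < 2 ∨ pvC m < 2) :
    kmarsh_alt m = 0 := by
  unfold kmarsh_alt
  rcases h with h | h
  · rw [if_pos (by omega)]
  · by_cases hR : m.length < 2
    · rw [if_pos hR]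
    · rw [if_neg hR, if_pos (by
        show ((m.headD "").length : Int) < 2
        have : (m.headD "").length = pvC m := rfl
        omega)]

-- ===== VERDICT (by name: the statement is the Claim_ definition above) =====
theorem kmarsh_spec : Claim_equal_kmarsh := by
  intro m _ hpre
  unfold Spec_kmarsh
  by_cases hd : m.length < 2 ∨ pvC m < 2
  · rw [kmarsh_degen m hd, kmarsh_alt_degen m hd]
  · push_neg at hd
    have hp3 : ∀ r ∈ m, pvC m ≤ r.length := by
      rcases hpre with h | h | h
      · exact absurd h (by omega)
      · exact absurd h (by have : (m.headD "").length = pvC m := rfl; omega)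
      · exact h
    exact pvIsBest_unique (kmarsh_isBest m hp3)
      (kmarsh_alt_isBest m (by omega) (by omega))
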